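-- pv_equiv track=rewrite | github.com/ChungChanghyun/TeamKoreaPhysicalAI_Testbed | planner.py | path_to_nodes
-- ===== SOURCE A (Python) =====
-- from typing import List, Optional
--
-- def path_to_nodes(path: list) -> List[str]:
--     """
--     solver path [(state_id, cost), ...] → node_id 리스트.
--
--     S state 의 node_id 만 추출하고 연속 중복을 제거합니다.
--     예) [('S,16,0',0), ('M,16,31',1), ('S,31,0',2)] → ['16','31']
--     """
--     nodes: List[str] = []
--     for state_id, _ in path:
--         if state_id.startswith('S,'):
--             node_id = state_id.split(',')[1]
--             if not nodes or nodes[-1] != node_id: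
--                 nodes.append(node_id)
--     return nodes
-- ===== SOURCE B (Python) =====
-- from typing import List
--
--
-- def path_to_nodes(path: list) -> List[str]:
--     ids = [state_id.split(',')[1] for state_id, _ in path if state_id.startswith('S,')]
--     return _collapse(ids)
--
--
-- def _collapse(ids: List[str]) -> List[str]:
--     # Divide and conquer: collapse each half, then join the halves, dropping the
--     # right half's first element when it equals the left half's last element.
--     # Correct because collapsing runs of equal elements merges associatively.
--     if len(ids) <= 1:
--         return ids[:]
--     mid = len(ids) // 2
--     left = _collapse(ids[:mid])
--     right = _collapse(ids[mid:])
--     if left[-1] == right[0]: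
--         return left + right[1:]
--     return left + right
-- ===== Notes on version B (the rewrite author's own statement) =====
-- stated objective: alternative
-- what changed: Replaces A's single stateful scan (append while comparing against nodes[-1]) by an extraction comprehension followed by a divide-and-conquer collapse: split the id list in half, recursively collapse each half, and merge by dropping the right half's head when it equals the left half's last element.
import Mathlib
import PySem

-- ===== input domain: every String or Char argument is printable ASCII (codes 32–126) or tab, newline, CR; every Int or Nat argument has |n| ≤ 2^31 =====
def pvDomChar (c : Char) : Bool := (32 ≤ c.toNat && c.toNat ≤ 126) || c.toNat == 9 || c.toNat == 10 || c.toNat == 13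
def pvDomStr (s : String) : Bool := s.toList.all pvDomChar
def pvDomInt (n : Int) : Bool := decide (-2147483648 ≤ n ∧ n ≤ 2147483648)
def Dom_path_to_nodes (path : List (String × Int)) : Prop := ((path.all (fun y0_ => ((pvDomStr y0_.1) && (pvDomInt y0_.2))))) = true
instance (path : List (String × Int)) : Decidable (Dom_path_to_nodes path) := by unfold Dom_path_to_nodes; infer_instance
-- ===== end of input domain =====

-- B replaces A's single stateful scan by extraction plus a divide-and-conquer collapse of
-- consecutive duplicates; objective: alternative algorithm, same observable behaviour.

-- ===== PORT A =====
-- A: one loop over path with accumulator `nodes`, appending when the last element differs.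
def path_to_nodes (path : List (String × Int)) : List String :=
  path.foldl (fun nodes sc =>
    if PySem.Str.startswith sc.1 "S," then
      let node_id := (PySem.List.pyGet? ((PySem.Str.split? sc.1 ",").getD []) 1).getD ""
      -- `split(',')[1]` never raises here: startswith('S,') guarantees ≥ 2 parts, so the
      -- getD defaults are unreachable (sep "," ≠ "" and index 1 in range).
      if nodes = [] ∨ PySem.List.pyGet? nodes (-1) ≠ some node_id then nodes ++ [node_id]
      else nodes
    else nodes) []

-- ===== PORT B =====
-- port of Source B's _collapse: split at the midpoint, collapse halves, merge
def pvCollapse (ids : List String) : List String :=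
  if h : ids.length ≤ 1 then ids
  else
    let mid := ids.length / 2
    let left := pvCollapse (ids.take mid)
    let right := pvCollapse (ids.drop mid)
    -- left and right are provably nonempty here, so Python's left[-1]/right[0] never raise
    if PySem.List.pyGet? left (-1) = PySem.List.pyGet? right 0 then
      left ++ right.drop 1   -- right[1:]
    else left ++ right
termination_by ids.length
decreasing_by
  · simp only [List.length_take]; omega
  · simp only [List.length_drop]; omega

def path_to_nodes_alt (path : List (String × Int)) : List String :=
  pvCollapse
    ((path.filter (fun sc => PySem.Str.startswith sc.1 "S,")).map
      (fun sc => (PySem.List.pyGet? ((PySem.Str.split? sc.1 ",").getD []) 1).getD ""))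

-- ===== PRECONDITION & SPEC =====
def Spec_path_to_nodes (path : List (String × Int)) (out : List String) : Prop := out = path_to_nodes_alt path
instance (path : List (String × Int)) (out : List String) : Decidable (Spec_path_to_nodes path out) := by unfold Spec_path_to_nodes; infer_instance

-- ===== CLAIM (what is proved, stated in full; the proofs are below) =====
def Claim_equal_path_to_nodes : Prop := ∀ (path : List (String × Int)), Dom_path_to_nodes path → Spec_path_to_nodes path (path_to_nodes path)

-- ===== LEMMAS AND PROOFS =====

-- the id extracted from an S-state entry
def pvExt (sc : String × Int) : String := (PySem.List.pyGet? ((PySem.Str.split? sc.1 ",").getD []) 1).getD ""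

-- A's dedup step, isolated on the stream of extracted ids
def pvStep (nodes : List String) (id : String) : List String :=
  if nodes = [] ∨ PySem.List.pyGet? nodes (-1) ≠ some id then nodes ++ [id] else nodes

-- canonical consecutive-dedup with the "previous element" carried explicitly
def pvGo : Option String → List String → List String
  | _, [] => []
  | last, a :: rest => if last = some a then pvGo last rest else a :: pvGo (some a) rest

theorem foldl_eq_foldl_extract (path : List (String × Int)) (acc : List String) :
    path.foldl (fun nodes sc =>
      if PySem.Str.startswith sc.1 "S," then
        let node_id := (PySem.List.pyGet? ((PySem.Str.split? sc.1 ",").getD []) 1).getD ""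
        if nodes = [] ∨ PySem.List.pyGet? nodes (-1) ≠ some node_id then nodes ++ [node_id]
        else nodes
      else nodes) acc
    = ((path.filter (fun sc => PySem.Str.startswith sc.1 "S,")).map pvExt).foldl pvStep acc := by
  induction path generalizing acc with
  | nil => rfl
  | cons hd tl ih =>
      by_cases h : PySem.Str.startswith hd.1 "S," = true
      · rw [List.foldl_cons, List.filter_cons_of_pos (by simpa using h), List.map_cons,
          List.foldl_cons, if_pos h, ih]
        rfl
      · rw [List.foldl_cons, List.filter_cons_of_neg (by simpa using h), if_neg h, ih]

theorem foldl_step_eq_go (l : List String) (acc : List String) :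
    l.foldl pvStep acc = acc ++ pvGo acc.getLast? l := by
  induction l generalizing acc with
  | nil => simp [pvGo]
  | cons a rest ih =>
      by_cases h : acc.getLast? = some a
      · have hne : acc ≠ [] := by
          intro he; rw [he] at h; simp at h
        have hstep : pvStep acc a = acc := by
          simp [pvStep, hne, PySem.List.pyGet?_neg_one, h]
        simp [List.foldl, hstep, ih, pvGo, h]
      · have hstep : pvStep acc a = acc ++ [a] := by
          simp [pvStep, PySem.List.pyGet?_neg_one, h]
        have hlast : (acc ++ [a]).getLast? = some a := by simp
        simp [List.foldl, hstep, ih, hlast, pvGo, h]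

theorem go_cons_last (a : String) (t : List String) :
    (a :: pvGo (some a) t).getLast? = (a :: t).getLast? := by
  induction t generalizing a with
  | nil => rfl
  | cons b t' ih =>
      by_cases h : a = b
      · subst h
        rw [pvGo, if_pos rfl, ih a]
        cases t' <;> simp
      · rw [pvGo, if_neg (by simpa using h)]
        have := ih b
        simp only [List.getLast?_cons_cons]
        simpa using this

theorem go_append (p : Option String) (l1 l2 : List String) :
    pvGo p (l1 ++ l2) = pvGo p l1 ++ pvGo (l1.getLast?.or p) l2 := by
  induction l1 generalizing p with
  | nil => simp [pvGo]
  | cons a t ih =>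
      have hlast : (a :: t).getLast?.or p = (t.getLast?).or (some a) := by
        cases t with
        | nil => simp
        | cons c t' =>
            have hs : (c :: t').getLast?.isSome := by simp
            rw [List.getLast?_cons_cons, Option.or_of_isSome hs, Option.or_of_isSome hs]
      by_cases h : p = some a
      · rw [List.cons_append, pvGo, if_pos h, pvGo, if_pos h, ih, hlast, h]
      · rw [List.cons_append, pvGo, if_neg h, pvGo, if_neg h, ih, hlast, List.cons_append]

theorem collapse_eq_go (l : List String) : pvCollapse l = pvGo none l := by
  by_cases h : l.length ≤ 1
  · rw [pvCollapse, dif_pos h]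
    match l, h with
    | [], _ => rfl
    | [a], _ => simp [pvGo]
  · rw [pvCollapse, dif_neg h]
    have ihL := collapse_eq_go (l.take (l.length / 2))
    have ihR := collapse_eq_go (l.drop (l.length / 2))
    have hmid1 : 1 ≤ l.length / 2 := by omega
    have hmidlt : l.length / 2 < l.length := by omega
    obtain ⟨b, hb⟩ : ∃ b, (l.take (l.length / 2)).getLast? = some b := by
      cases hg : (l.take (l.length / 2)).getLast? with
      | some b => exact ⟨b, rfl⟩
      | none =>
          rw [List.getLast?_eq_none_iff] at hg
          have hlt : (l.take (l.length / 2)).length = l.length / 2 := by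
            rw [List.length_take]; omega
          rw [hg] at hlt; simp at hlt; omega
    obtain ⟨h2hd, t2, ht2⟩ : ∃ h2hd t2, l.drop (l.length / 2) = h2hd :: t2 := by
      cases hd : l.drop (l.length / 2) with
      | nil =>
          have hlen := congrArg List.length hd
          rw [List.length_drop] at hlen; simp at hlen; omega
      | cons x xs => exact ⟨x, xs, rfl⟩
    have hsplit : l = l.take (l.length / 2) ++ l.drop (l.length / 2) :=
      (List.take_append_drop _ _).symm
    have hlastL : (pvGo none (l.take (l.length / 2))).getLast? = some b := by
      obtain ⟨c, t1, hc⟩ : ∃ c t1, l.take (l.length / 2) = c :: t1 := by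
        cases ht : l.take (l.length / 2) with
        | nil => rw [ht] at hb; simp at hb
        | cons x xs => exact ⟨x, xs, rfl⟩
      rw [hc, pvGo, if_neg (by simp), go_cons_last, ← hc, hb]
    simp only [ihL, ihR]
    conv_rhs => rw [hsplit]
    rw [go_append, Option.or_none, hb, ht2]
    have hCr : pvGo none (h2hd :: t2) = h2hd :: pvGo (some h2hd) t2 := by
      rw [pvGo, if_neg (by simp)]
    rw [PySem.List.pyGet?_neg_one, hlastL, hCr, PySem.List.pyGet?_zero]
    have hRgo : pvGo (some b) (h2hd :: t2)
        = if b = h2hd then pvGo (some h2hd) t2 else h2hd :: pvGo (some h2hd) t2 := by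
      by_cases hbe : b = h2hd
      · rw [pvGo, if_pos (by rw [hbe]), hbe, if_pos rfl]
      · rw [pvGo, if_neg (by simpa using hbe), if_neg hbe]
    rw [hRgo]
    by_cases hbe : b = h2hd
    · simp [hbe]
    · simp [hbe]
termination_by l.length
decreasing_by
  · simp only [List.length_take]; omega
  · simp only [List.length_drop]; omega

-- ===== VERDICT (by name: the statement is the Claim_ definition above) =====
theorem path_to_nodes_spec : Claim_equal_path_to_nodes := by
  intro path _
  show path_to_nodes path = path_to_nodes_alt path
  unfold path_to_nodes path_to_nodes_alt
  rw [foldl_eq_foldl_extract, foldl_step_eq_go, collapse_eq_go]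
  rfl
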